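-- pv_equiv track=rewrite | github.com/AraaaAraa/SegundoParcial | core/logica_preguntas.py | calcular_racha_actual
-- ===== SOURCE A (Python) =====
-- def calcular_racha_actual(respuestas_actuales: list) -> int:
--     """Calcula la racha actual de respuestas correctas."""
--     if not respuestas_actuales:
--         return 0
--
--     racha_actual = 0
--     i = len(respuestas_actuales) - 1
--
--     while i >= 0:
--         respuesta = respuestas_actuales[i]
--         es_correcta = False
--         for clave in respuesta:
--             if clave == "es_correcta":
--                 es_correcta = respuesta[clave]
--                 break
--
--         if es_correcta:
--             racha_actual += 1
--         else:
--             break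
--
--         i -= 1
--
--     return racha_actual
-- ===== SOURCE B (Python) =====
-- def calcular_racha_actual(respuestas_actuales: list) -> int:
--     """Calcula la racha actual de respuestas correctas."""
--     last_wrong = -1
--     for i, r in enumerate(respuestas_actuales):
--         if not r.get("es_correcta", False):
--             last_wrong = i
--     return len(respuestas_actuales) - 1 - last_wrong
-- ===== Notes on version B (the rewrite author's own statement) =====
-- stated objective: simpler
-- what changed: Replaced the backward early-break counting while-loop (with an inner key-scan loop over each dict) by a single forward enumerate pass recording the index of the last incorrect answer, returning len - 1 - last_wrong; missing keys are handled via .get with default False.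
import Mathlib
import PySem

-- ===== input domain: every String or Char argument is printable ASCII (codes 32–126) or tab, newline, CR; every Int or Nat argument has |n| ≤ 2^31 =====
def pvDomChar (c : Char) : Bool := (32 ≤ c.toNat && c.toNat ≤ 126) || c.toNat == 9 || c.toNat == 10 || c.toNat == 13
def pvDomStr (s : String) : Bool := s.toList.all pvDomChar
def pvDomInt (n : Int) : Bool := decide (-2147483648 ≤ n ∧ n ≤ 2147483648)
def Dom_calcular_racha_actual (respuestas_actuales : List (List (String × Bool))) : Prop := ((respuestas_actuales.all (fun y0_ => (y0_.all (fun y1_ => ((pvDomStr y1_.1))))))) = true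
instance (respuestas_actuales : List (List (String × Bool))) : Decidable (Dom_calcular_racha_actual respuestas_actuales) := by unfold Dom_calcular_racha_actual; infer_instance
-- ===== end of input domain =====

-- ===== PORT A =====
-- B rewrites A's backward early-break while-loop as one forward pass tracking the last wrong index (simpler decomposition; same cost).
-- inner for-clave loop with break: scan the dict's keys in order; respuesta[clave] is first-match
-- lookup (exact: clave is a key of respuesta, so the lookup never raises)
def pvClaveLoop (respuesta : List (String × Bool)) : List String → Bool
  | [] => false
  | clave :: resto =>
    if clave == "es_correcta" then ((respuesta.lookup clave).getD false)
    else pvClaveLoop respuesta resto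

-- while i >= 0 loop, with i = n - 1; respuestas_actuales[i] is in range, so getD [] is exact
def pvWhileA (rs : List (List (String × Bool))) : Nat → Int → Int
  | 0, racha => racha
  | n + 1, racha =>
    let respuesta := (rs[n]?).getD []
    let es_correcta := pvClaveLoop respuesta (respuesta.map Prod.fst)
    if es_correcta then pvWhileA rs n (racha + 1) else racha

def calcular_racha_actual (respuestas_actuales : List (List (String × Bool))) : Int :=
  if respuestas_actuales = [] then 0
  else pvWhileA respuestas_actuales respuestas_actuales.length 0

-- ===== PORT B =====
-- forward pass: state (i, last_wrong); r.get("es_correcta", False) is first-match lookup with default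
def pvStepB (p : Int × Int) (r : List (String × Bool)) : Int × Int :=
  (p.1 + 1, if (r.lookup "es_correcta").getD false then p.2 else p.1)

def calcular_racha_actual_alt (respuestas_actuales : List (List (String × Bool))) : Int :=
  let p := respuestas_actuales.foldl pvStepB (0, -1)
  (respuestas_actuales.length : Int) - 1 - p.2

-- ===== PRECONDITION & SPEC =====
def Spec_calcular_racha_actual (respuestas_actuales : List (List (String × Bool))) (out : Int) : Prop := out = calcular_racha_actual_alt respuestas_actuales
instance (respuestas_actuales : List (List (String × Bool))) (out : Int) : Decidable (Spec_calcular_racha_actual respuestas_actuales out) := by unfold Spec_calcular_racha_actual; infer_instance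

-- ===== CLAIM (what is proved, stated in full; the proofs are below) =====
def Claim_equal_calcular_racha_actual : Prop := ∀ (respuestas_actuales : List (List (String × Bool))), Dom_calcular_racha_actual respuestas_actuales → Spec_calcular_racha_actual respuestas_actuales (calcular_racha_actual respuestas_actuales)

-- ===== LEMMAS AND PROOFS =====

-- the truth value both ports extract from one answer dict
def pvCorrect (r : List (String × Bool)) : Bool := (r.lookup "es_correcta").getD false

-- A's inner key scan computes exactly the first-match lookup
theorem pvClaveLoop_lookup (resp : List (String × Bool)) :
    ∀ ks, ("es_correcta" ∈ ks → pvClaveLoop resp ks = pvCorrect resp) ∧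
          ("es_correcta" ∉ ks → pvClaveLoop resp ks = false) := by
  intro ks
  induction ks with
  | nil => simp [pvClaveLoop]
  | cons k ks ih =>
    constructor
    · intro hmem
      by_cases hk : k = "es_correcta"
      · subst hk; simp [pvClaveLoop, pvCorrect]
      · simp only [pvClaveLoop, beq_iff_eq, hk, if_false]
        rcases List.mem_cons.mp hmem with h | h
        · exact absurd h.symm hk
        · exact ih.1 h
    · intro hmem
      have hk : k ≠ "es_correcta" := fun e => hmem (e ▸ List.mem_cons_self)
      simp only [pvClaveLoop, beq_iff_eq, hk, if_false]
      exact ih.2 (fun h => hmem (List.mem_cons_of_mem _ h))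

theorem pvEs_eq (resp : List (String × Bool)) :
    pvClaveLoop resp (resp.map Prod.fst) = pvCorrect resp := by
  by_cases h : "es_correcta" ∈ resp.map Prod.fst
  · exact (pvClaveLoop_lookup resp _).1 h
  · rw [(pvClaveLoop_lookup resp _).2 h]
    have hnone : resp.lookup "es_correcta" = none := by
      induction resp with
      | nil => rfl
      | cons p ps ih =>
        have hp : p.1 ≠ "es_correcta" := by
          intro e; exact h (List.mem_map.mpr ⟨p, List.mem_cons_self, e⟩)
        have : ("es_correcta" == p.1) = false := by
          exact beq_eq_false_iff_ne.mpr (fun e => hp e.symm)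
        simp only [List.lookup, this]
        exact ih (fun hm => h (by
          rcases List.mem_map.mp hm with ⟨q, hq, he⟩
          exact List.mem_map.mpr ⟨q, List.mem_cons_of_mem _ hq, he⟩))
    simp [pvCorrect, hnone]

-- pvWhileA on a prefix: indices below xs.length ignore the appended element
theorem pvWhileA_prefix (xs : List (List (String × Bool))) (x : List (String × Bool)) :
    ∀ n, n ≤ xs.length → ∀ r, pvWhileA (xs ++ [x]) n r = pvWhileA xs n r := by
  intro n
  induction n with
  | zero => intro _ r; rfl
  | succ n ih =>
    intro hn r
    have hlt : n < xs.length := hn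
    simp only [pvWhileA, List.getElem?_append_left hlt]
    split <;> [exact ih (Nat.le_of_lt hlt) _; rfl]

theorem pvWhileA_add (rs : List (List (String × Bool))) :
    ∀ n r, pvWhileA rs n r = r + pvWhileA rs n 0 := by
  intro n
  induction n with
  | zero => intro r; simp [pvWhileA]
  | succ n ih =>
    intro r
    simp only [pvWhileA]
    split
    · rw [ih (r + 1), ih (0 + 1)]; ring
    · simp

theorem pvA_append (xs : List (List (String × Bool))) (x : List (String × Bool)) :
    calcular_racha_actual (xs ++ [x]) =
      if pvCorrect x then calcular_racha_actual xs + 1 else 0 := by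
  have hne : xs ++ [x] ≠ [] := by simp
  unfold calcular_racha_actual
  rw [if_neg hne]
  have hlen : (xs ++ [x]).length = xs.length + 1 := by simp
  rw [hlen]
  show (if pvClaveLoop ((xs ++ [x])[xs.length]?.getD []) (((xs ++ [x])[xs.length]?.getD []).map Prod.fst) then
      pvWhileA (xs ++ [x]) xs.length (0 + 1) else 0) = _
  have hget : (xs ++ [x])[xs.length]?.getD [] = x := by
    rw [List.getElem?_append_right (Nat.le_refl xs.length)]; simp
  rw [hget, pvEs_eq]
  by_cases hc : pvCorrect x
  · rw [if_pos hc, if_pos hc,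
      pvWhileA_prefix xs x xs.length (Nat.le_refl _), pvWhileA_add]
    by_cases hx : xs = []
    · subst hx; simp [pvWhileA]
    · rw [if_neg hx]; ring
  · simp [hc]

-- B-side: the first component of the fold state counts the elements processed
theorem pvFold_fst (xs : List (List (String × Bool))) :
    ∀ p : Int × Int, (xs.foldl pvStepB p).1 = p.1 + xs.length := by
  induction xs with
  | nil => intro p; simp
  | cons y ys ih =>
    intro p
    simp only [List.foldl_cons, ih, pvStepB, List.length_cons]
    push_cast; ring

theorem pvB_append (xs : List (List (String × Bool))) (x : List (String × Bool)) :
    calcular_racha_actual_alt (xs ++ [x]) =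
      if pvCorrect x then calcular_racha_actual_alt xs + 1 else 0 := by
  unfold calcular_racha_actual_alt
  rw [List.foldl_append]
  simp only [List.foldl_cons, List.foldl_nil]
  have hfst := pvFold_fst xs (0, -1)
  show ((xs ++ [x]).length : Int) - 1 -
      (pvStepB (xs.foldl pvStepB (0, -1)) x).2 = _
  simp only [pvStepB, pvCorrect, List.length_append, List.length_singleton]
  split
  · push_cast; ring
  · rw [hfst]; push_cast; ring

theorem pvAB (rs : List (List (String × Bool))) :
    calcular_racha_actual rs = calcular_racha_actual_alt rs := by
  induction rs using List.reverseRecOn with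
  | nil => rfl
  | append_singleton xs x ih =>
    rw [pvA_append, pvB_append, ih]

-- ===== VERDICT (by name: the statement is the Claim_ definition above) =====
theorem calcular_racha_actual_spec : Claim_equal_calcular_racha_actual := by
  intro rs _
  unfold Spec_calcular_racha_actual
  exact pvAB rs
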